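-- pv_equiv track=rewrite | github.com/AINetworkLab/MycoStore | src/utils/minio_utils.py | common_layer_identification
-- ===== SOURCE A (Python) =====
-- from collections import defaultdict
--
-- def match_and_group(L_prime, k, group):
--     for layer_id in L_prime:
--         prefix = layer_id[:k]
--         if prefix not in group:
--             group[prefix] = [layer_id]
--         else:
--             matched = False
--             for item in group[prefix]:
--                 if item == layer_id:
--                     matched = True
--                     break
--             if not matched:
--                 group[prefix].append(layer_id)
--     return group
--
-- def common_layer_identification(layer_hash_list, k=4, bucket=None):
--     if bucket is None:
--         bucket = defaultdict(list)
--     # Intra-model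
--     local = defaultdict(list)
--     local = match_and_group(layer_hash_list, k, local)
--     all_local_layers = [layer_id for group in local.values() for layer_id in group]
--     # Inter-model
--     bucket = match_and_group(all_local_layers, k, bucket)
--     return bucket
-- ===== SOURCE B (Python) =====
-- def common_layer_identification(layer_hash_list, k=4, bucket=None):
--     # Per-prefix gather: compute the ordered key list once from the existing
--     # bucket keys plus the hashes' prefixes, then build each group by filtering
--     # the hash list (no per-item dict insertion, no intermediate grouping).
--     base = {} if bucket is None else bucket
--     order = list(dict.fromkeys(list(base) + [h[:k] for h in layer_hash_list]))
--     result = {}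
--     for key in order:
--         group = list(base.get(key, []))
--         for h in layer_hash_list:
--             if h[:k] == key and h not in group:
--                 group.append(h)
--         result[key] = group
--     return result
-- ===== Notes on version B (the rewrite author's own statement) =====
-- stated objective: alternative
-- what changed: A inserts each hash item-by-item into a dict twice (a local grouping, flattened, then regrouped into the bucket); B transposes the loops: it computes the ordered key list once (existing bucket keys plus first-occurrence prefixes) and then builds each group in one gather pass that filters the hash list, never inserting item-by-item.
import Mathlib
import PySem

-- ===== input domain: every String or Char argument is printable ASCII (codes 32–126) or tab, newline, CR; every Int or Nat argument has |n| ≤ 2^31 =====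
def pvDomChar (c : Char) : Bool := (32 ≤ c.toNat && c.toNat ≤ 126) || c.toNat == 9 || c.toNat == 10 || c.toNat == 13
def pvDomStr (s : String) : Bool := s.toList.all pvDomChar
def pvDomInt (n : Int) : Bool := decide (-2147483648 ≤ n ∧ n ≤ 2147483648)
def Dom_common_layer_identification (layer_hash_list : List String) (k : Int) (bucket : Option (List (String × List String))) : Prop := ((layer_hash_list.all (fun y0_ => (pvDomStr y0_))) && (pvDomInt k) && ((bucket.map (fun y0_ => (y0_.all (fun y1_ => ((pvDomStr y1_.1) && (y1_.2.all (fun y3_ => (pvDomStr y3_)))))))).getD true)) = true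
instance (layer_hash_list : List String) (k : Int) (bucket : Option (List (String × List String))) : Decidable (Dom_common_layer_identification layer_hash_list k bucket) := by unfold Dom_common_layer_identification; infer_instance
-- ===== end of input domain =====

-- B transposes A's per-item dict-insertion passes into a per-key gather: the ordered key list
-- is computed once, then each group is built by filtering the hash list (objective: alternative).
-- A mutates a provided bucket in place in Python; the equivalence proved here is about the RETURN value.

-- ===== PORT A =====
-- for item in group[prefix]: if item == layer_id: matched = True; break
def pvMatched : List String → String → Bool
  | [], _ => false
  | item :: rest, layer_id => if item == layer_id then true else pvMatched rest layer_id

-- body of match_and_group's loop over L_prime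
def pvMagStep (k : Int) (group : PySem.Dict String (List String)) (layer_id : String) :
    PySem.Dict String (List String) :=
  let pfx := PySem.Str.slice layer_id none (some k)
  if group.contains pfx = false then
    group.insert pfx [layer_id]
  else
    if pvMatched (group.getD pfx []) layer_id then group
    else group.modify pfx [] (fun items => items ++ [layer_id])

def match_and_group (L_prime : List String) (k : Int) (group : PySem.Dict String (List String)) :
    PySem.Dict String (List String) :=
  L_prime.foldl (pvMagStep k) group

def common_layer_identification (layer_hash_list : List String) (k : Int)
    (bucket : Option (List (String × List String))) : List (String × List String) :=
  let bucket0 : PySem.Dict String (List String) :=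
    match bucket with
    | none => PySem.Dict.empty      -- bucket = defaultdict(list); the factory is never triggered
    | some b => PySem.Dict.mk b
  let localD := match_and_group layer_hash_list k PySem.Dict.empty
  let all_local_layers :=
    (PySem.Dict.values localD).flatMap (fun group => group.map (fun layer_id => layer_id))
  (match_and_group all_local_layers k bucket0).items

-- ===== PORT B =====
-- group = list(base.get(key, [])); for h in layer_hash_list: if h[:k] == key and h not in group: group.append(h)
def pvGroupOf (layer_hash_list : List String) (k : Int)
    (base : PySem.Dict String (List String)) (key : String) : List String :=
  layer_hash_list.foldl
    (fun g h =>
      if (PySem.Str.slice h none (some k) == key) && !(g.contains h) then g ++ [h] else g)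
    (base.getD key [])

def common_layer_identification_alt (layer_hash_list : List String) (k : Int)
    (bucket : Option (List (String × List String))) : List (String × List String) :=
  let base : PySem.Dict String (List String) :=
    match bucket with
    | none => PySem.Dict.empty
    | some b => PySem.Dict.mk b
  -- order = list(dict.fromkeys(list(base) + [h[:k] for h in layer_hash_list]))
  let order := PySem.List.dedup
    (base.keys ++ layer_hash_list.map (fun h => PySem.Str.slice h none (some k)))
  (order.foldl (fun res key => res.insert key (pvGroupOf layer_hash_list k base key))
    PySem.Dict.empty).items

-- ===== PRECONDITION & SPEC =====
-- Pre_ excludes association lists with duplicate keys: they do not represent any Python dict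
-- (a Python dict cannot hold a key twice), so the ports' behaviour on them is representation-dependent.
def Pre_common_layer_identification (layer_hash_list : List String) (k : Int)
    (bucket : Option (List (String × List String))) : Prop :=
  ((bucket.getD []).map Prod.fst).Nodup
instance (layer_hash_list : List String) (k : Int) (bucket : Option (List (String × List String))) : Decidable (Pre_common_layer_identification layer_hash_list k bucket) := by unfold Pre_common_layer_identification; infer_instance

def pvWitness_common_layer_identification : List String × Int × (Option (List (String × List String))) :=
  (["aab", "aac", "bcd"], 2, some [("zz", ["zzx"])])

def Spec_common_layer_identification (layer_hash_list : List String) (k : Int) (bucket : Option (List (String × List String))) (out : List (String × List String)) : Prop := out = common_layer_identification_alt layer_hash_list k bucket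
instance (layer_hash_list : List String) (k : Int) (bucket : Option (List (String × List String))) (out : List (String × List String)) : Decidable (Spec_common_layer_identification layer_hash_list k bucket out) := by unfold Spec_common_layer_identification; infer_instance

-- ===== CLAIM (what is proved, stated in full; the proofs are below) =====
def Claim_equal_common_layer_identification : Prop := ∀ (layer_hash_list : List String) (k : Int) (bucket : Option (List (String × List String))), Dom_common_layer_identification layer_hash_list k bucket → Pre_common_layer_identification layer_hash_list k bucket → Spec_common_layer_identification layer_hash_list k bucket (common_layer_identification layer_hash_list k bucket)

-- ===== LEMMAS AND PROOFS =====

def pvPfx (k : Int) (x : String) : String := PySem.Str.slice x none (some k)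

lemma pvMatched_eq_contains (g : List String) (h : String) : pvMatched g h = g.contains h := by
  induction g with
  | nil => rfl
  | cons item rest ih =>
      by_cases hx : item == h
      · have he : item = h := by simpa using hx
        simp [pvMatched, he]
      · have hne : item ≠ h := by simpa using hx
        simp [pvMatched, hx, ih]
        intro e; exact absurd e.symm hne

lemma pvMatched_iff (g : List String) (h : String) : pvMatched g h = true ↔ h ∈ g := by
  rw [pvMatched_eq_contains]; exact List.contains_iff_mem

lemma pvStep_keys (k : Int) (d : PySem.Dict String (List String)) (h : String) :
    (pvMagStep k d h).keys = PySem.Set.add d.keys (pvPfx k h) := by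
  unfold pvMagStep pvPfx
  set p := PySem.Str.slice h none (some k) with hp
  by_cases hc : d.contains p = true
  · have hm : p ∈ d.keys := (PySem.Dict.contains_iff_mem_keys d p).mp hc
    rw [PySem.Set.add_of_mem hm]
    simp only [hc]
    by_cases hmt : pvMatched (d.getD p []) h
    · simp [hmt]
    · simp [hmt, PySem.Dict.keys_modify, PySem.Dict.keys_insert_of_contains _ _ hc]
  · have hc' : d.contains p = false := by simpa using hc
    have hm : p ∉ d.keys := fun hm => by
      simp [(PySem.Dict.contains_iff_mem_keys d p).mpr hm] at hc'
    rw [PySem.Set.add_of_not_mem hm]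
    simp [hc', PySem.Dict.keys_insert_of_not_contains]

lemma pvFold_keys (M : List String) (k : Int) (d : PySem.Dict String (List String)) :
    (M.foldl (pvMagStep k) d).keys = PySem.Set.update d.keys (M.map (pvPfx k)) := by
  induction M generalizing d with
  | nil => simp [PySem.Set.update]
  | cons h M ih => simp [List.foldl_cons, ih, pvStep_keys, PySem.Set.update_cons]

lemma pvStep_getD (k : Int) (d : PySem.Dict String (List String)) (h c : String) :
    (pvMagStep k d h).getD c [] =
      if pvPfx k h == c then PySem.Set.add (d.getD c []) h else d.getD c [] := by
  unfold pvMagStep pvPfx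
  set p := PySem.Str.slice h none (some k) with hp
  by_cases hpc : p = c
  · subst hpc
    simp only [beq_self_eq_true, if_true]
    by_cases hc : d.contains p = true
    · simp only [hc]
      by_cases hmt : pvMatched (d.getD p []) h
      · have hmem : h ∈ d.getD p [] := (pvMatched_iff _ _).mp hmt
        simp [hmt, PySem.Set.add_of_mem hmem]
      · have hmem : h ∉ d.getD p [] := fun hm => hmt ((pvMatched_iff _ _).mpr hm)
        simp [hmt, PySem.Dict.getD_modify_self, PySem.Set.add_of_not_mem hmem]
    · have hc' : d.contains p = false := by simpa using hc
      simp [hc', PySem.Dict.getD_insert_self, PySem.Dict.getD_of_not_contains _ _ hc',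
        PySem.Set.add_of_not_mem (List.not_mem_nil)]
  · have hbc : (p == c) = false := by simpa using hpc
    simp only [hbc, if_false]
    by_cases hc : d.contains p = true
    · simp only [hc]
      by_cases hmt : pvMatched (d.getD p []) h
      · simp [hmt]
      · simp [hmt, PySem.Dict.getD_modify_of_ne _ _ _ (fun e : c = p => hpc e.symm)]
    · have hc' : d.contains p = false := by simpa using hc
      simp [hc', PySem.Dict.getD_insert_of_ne _ _ _ (fun e : c = p => hpc e.symm)]

lemma pvFold_getD (M : List String) (k : Int) (d : PySem.Dict String (List String)) (c : String) :
    (M.foldl (pvMagStep k) d).getD c [] =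
      PySem.Set.update (d.getD c []) (M.filter (fun x => pvPfx k x == c)) := by
  induction M generalizing d with
  | nil => simp [PySem.Set.update]
  | cons h M ih =>
      simp only [List.foldl_cons, ih, List.filter_cons]
      by_cases hpc : pvPfx k h == c
      · simp [hpc, pvStep_getD, PySem.Set.update_cons]
      · have : (pvPfx k h == c) = false := by simpa using hpc
        simp [this, pvStep_getD]

lemma pvUpdate_of_subset (s ls : List String) (hsub : ∀ y ∈ ls, y ∈ s) :
    PySem.Set.update s ls = s := by
  rw [PySem.Set.update_eq_append_filter]
  have : List.filter (fun y => !PySem.Set.contains s y) (PySem.Set.ofList ls) = [] := by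
    rw [List.filter_eq_nil_iff]
    intro y hy
    have hys : y ∈ s := hsub y ((PySem.Set.mem_ofList _ _).mp hy)
    simpa using hys
  rw [this, List.append_nil]

lemma pvUpdate_const_block (s : List String) (c : String) (ls : List String)
    (hne : ls ≠ []) (hall : ∀ y ∈ ls, y = c) :
    PySem.Set.update s ls = PySem.Set.add s c := by
  cases ls with
  | nil => exact absurd rfl hne
  | cons y t =>
      have hy : y = c := hall y (by simp)
      subst hy
      rw [PySem.Set.update_cons]
      exact pvUpdate_of_subset _ _ (fun z hz => by
        have : z = y := hall z (by simp [hz])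
        subst this
        exact (PySem.Set.mem_add _ _ _).mpr (Or.inr rfl))

lemma pvUpdate_flatMap_const (cs : List String) (f : String → List String)
    (s : List String) (hf : ∀ c ∈ cs, f c ≠ [] ∧ ∀ y ∈ f c, y = c) :
    PySem.Set.update s (cs.flatMap f) = PySem.Set.update s cs := by
  induction cs generalizing s with
  | nil => simp
  | cons c cs ih =>
      rw [List.flatMap_cons, PySem.Set.update_append, PySem.Set.update_cons]
      rw [pvUpdate_const_block s c (f c) (hf c (by simp)).1 (hf c (by simp)).2]
      exact ih _ (fun c' hc' => hf c' (by simp [hc']))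

lemma pvFilter_flatMap_not_mem (cs : List String) (f : String → List String) (k : Int) (c : String)
    (hf : ∀ c' ∈ cs, ∀ y ∈ f c', pvPfx k y = c') (hc : c ∉ cs) :
    (cs.flatMap f).filter (fun x => pvPfx k x == c) = [] := by
  rw [List.filter_eq_nil_iff]
  intro y hy
  obtain ⟨c', hc', hyc'⟩ := List.mem_flatMap.mp hy
  have : pvPfx k y = c' := hf c' hc' y hyc'
  simp [this]
  intro e; exact hc (e ▸ hc')

lemma pvFilter_flatMap (cs : List String) (f : String → List String) (k : Int) (c : String)
    (hf : ∀ c' ∈ cs, ∀ y ∈ f c', pvPfx k y = c') (hnd : cs.Nodup) (hc : c ∈ cs) :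
    (cs.flatMap f).filter (fun x => pvPfx k x == c) = f c := by
  induction cs with
  | nil => simp at hc
  | cons c0 cs ih =>
      rw [List.flatMap_cons, List.filter_append]
      by_cases he : c0 = c
      · subst he
        have h1 : (f c0).filter (fun x => pvPfx k x == c0) = f c0 := by
          rw [List.filter_eq_self]
          intro y hy; simp [hf c0 (by simp) y hy]
        have h2 : (cs.flatMap f).filter (fun x => pvPfx k x == c0) = [] :=
          pvFilter_flatMap_not_mem cs f k c0 (fun c' hc' => hf c' (by simp [hc']))
            (by simpa using (List.nodup_cons.mp hnd).1)
        rw [h1, h2, List.append_nil]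
      · have h1 : (f c0).filter (fun x => pvPfx k x == c) = [] := by
          rw [List.filter_eq_nil_iff]
          intro y hy
          have : pvPfx k y = c0 := hf c0 (by simp) y hy
          simp [this]; exact he
        have hcc : c ∈ cs := by
          rcases List.mem_cons.mp hc with h | h
          · exact absurd h.symm he
          · exact h
        rw [h1, List.nil_append]
        exact ih (fun c' hc' => hf c' (by simp [hc'])) (List.nodup_cons.mp hnd).2 hcc

lemma pvFilter_eq_nil_of_not_mem (L : List String) (k : Int) (c : String)
    (hc : c ∉ PySem.Set.ofList (L.map (pvPfx k))) :
    L.filter (fun x => pvPfx k x == c) = [] := by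
  rw [List.filter_eq_nil_iff]
  intro x hx
  simp only [beq_iff_eq]
  intro e
  exact hc ((PySem.Set.mem_ofList _ _).mpr (List.mem_map.mpr ⟨x, hx, e⟩))

lemma pvUpdate_ofList (s xs : List String) :
    PySem.Set.update s (PySem.Set.ofList xs) = PySem.Set.update s xs := by
  rw [PySem.Set.update_eq_append_filter, PySem.Set.update_eq_append_filter,
      PySem.Set.ofList_ofList]

-- A's two grouping passes equal ONE pvMagStep pass over L (items of the dicts agree)
theorem pvA_onepass (L : List String) (k : Int)
    (b0 : PySem.Dict String (List String)) (hnd : b0.keys.Nodup) :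
    (((PySem.Dict.values (match_and_group L k PySem.Dict.empty)).flatMap
        (fun group => group.map (fun layer_id => layer_id))).foldl (pvMagStep k) b0).items =
    (L.foldl (pvMagStep k) b0).items := by
  set localD := match_and_group L k PySem.Dict.empty with hloc
  set K : List String := PySem.Set.ofList (L.map (pvPfx k)) with hK
  have hkeysLoc : localD.keys = K := by
    rw [hloc]
    unfold match_and_group
    rw [pvFold_keys]
    simp [PySem.Set.update_nil_left, ← hK]
  have hnodK : K.Nodup := hK ▸ PySem.Set.nodup_ofList _
  have hg : ∀ c, localD.getD c [] = PySem.Set.ofList (L.filter (fun x => pvPfx k x == c)) := by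
    intro c
    rw [hloc]; unfold match_and_group
    rw [pvFold_getD]
    simp [PySem.Set.update_nil_left]
  have hgmem : ∀ c, ∀ y ∈ localD.getD c [], pvPfx k y = c := by
    intro c y hy
    rw [hg c] at hy
    have := (PySem.Set.mem_ofList _ _).mp hy
    simpa using List.of_mem_filter this
  have hgne : ∀ c ∈ K, localD.getD c [] ≠ [] := by
    intro c hc
    obtain ⟨x, hx, hxc⟩ := List.mem_map.mp ((PySem.Set.mem_ofList _ _).mp (hK ▸ hc))
    have hxf : x ∈ L.filter (fun x => pvPfx k x == c) :=
      List.mem_filter.mpr ⟨hx, by simp [hxc]⟩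
    have : x ∈ localD.getD c [] := by
      rw [hg c]; exact (PySem.Set.mem_ofList _ _).mpr hxf
    exact fun he => by simp [he] at this
  have hvals : PySem.Dict.values localD = K.map (fun c => localD.getD c []) := by
    rw [PySem.Dict.values_eq_map_keys localD (hkeysLoc ▸ hnodK) [], hkeysLoc]
  have hflat : (PySem.Dict.values localD).flatMap (fun group => group.map (fun layer_id => layer_id))
      = K.flatMap (fun c => localD.getD c []) := by
    rw [hvals]
    rw [List.flatMap_map]
    simp
  rw [hflat]
  set M := K.flatMap (fun c => localD.getD c []) with hM
  have hfprop : ∀ c' ∈ K, ∀ y ∈ localD.getD c' [], pvPfx k y = c' := fun c' _ => hgmem c'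
  have hkeysA : (M.foldl (pvMagStep k) b0).keys = PySem.Set.update b0.keys (L.map (pvPfx k)) := by
    rw [pvFold_keys]
    have hmapM : M.map (pvPfx k) = K.flatMap (fun c => (localD.getD c []).map (pvPfx k)) := by
      rw [hM, List.map_flatMap]
    rw [hmapM, pvUpdate_flatMap_const _ _ _ ?hf]
    · rw [hK, pvUpdate_ofList]
    case hf =>
      intro c hc
      refine ⟨fun he => hgne c hc (by simpa using he), ?_⟩
      intro y hy
      obtain ⟨z, hz, rfl⟩ := List.mem_map.mp hy
      exact hgmem c z hz
  have hgetD : ∀ c, (M.foldl (pvMagStep k) b0).getD c [] =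
      (L.foldl (pvMagStep k) b0).getD c [] := by
    intro c
    rw [pvFold_getD, pvFold_getD]
    by_cases hc : c ∈ K
    · rw [hM, pvFilter_flatMap K _ k c hfprop hnodK hc, hg c, pvUpdate_ofList]
    · rw [hM, pvFilter_flatMap_not_mem K _ k c hfprop hc,
          pvFilter_eq_nil_of_not_mem L k c (by rw [← hK]; exact hc)]
  have hndA : (M.foldl (pvMagStep k) b0).keys.Nodup := by
    rw [hkeysA]; exact PySem.Set.nodup_update _ _ hnd
  have hndB : (L.foldl (pvMagStep k) b0).keys.Nodup := by
    rw [pvFold_keys]; exact PySem.Set.nodup_update _ _ hnd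
  rw [PySem.Dict.items_eq_map_keys _ hndA [], PySem.Dict.items_eq_map_keys _ hndB [],
      hkeysA, pvFold_keys]
  apply List.map_congr_left
  intro c _
  rw [hgetD c]

-- B's inner gather loop computes Set.update of the base group by the filtered hashes
lemma pvGroup_eq_update (L : List String) (k : Int)
    (base : PySem.Dict String (List String)) (key : String) :
    pvGroupOf L k base key =
      PySem.Set.update (base.getD key []) (L.filter (fun x => pvPfx k x == key)) := by
  unfold pvGroupOf
  have main : ∀ (g : List String),
      L.foldl (fun g h =>
        if (PySem.Str.slice h none (some k) == key) && !(g.contains h) then g ++ [h] else g) g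
      = (L.filter (fun x => pvPfx k x == key)).foldl PySem.Set.add g := by
    induction L with
    | nil => intro g; rfl
    | cons h t ih =>
        intro g
        simp only [List.foldl_cons, List.filter_cons]
        by_cases hp : pvPfx k h == key
        · have hp' : (PySem.Str.slice h none (some k) == key) = true := hp
          simp only [hp, if_true, hp', Bool.true_and]
          have hadd : (if !(g.contains h) then g ++ [h] else g) = PySem.Set.add g h := by
            unfold PySem.Set.add PySem.Set.contains
            by_cases hc : g.contains h <;> simp [hc]
          rw [List.foldl_cons, hadd, ih]
        · have hp' : (PySem.Str.slice h none (some k) == key) = false := by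
            simpa [pvPfx] using hp
          simp only [hp', Bool.false_and, if_false]
          have : (pvPfx k h == key) = false := by simpa using hp
          simp only [this, if_false]
          exact ih g
  rw [main]
  rfl

theorem common_layer_identification_spec_aux (L : List String) (k : Int)
    (b0 : PySem.Dict String (List String)) (hnd : b0.keys.Nodup) :
    (((PySem.Dict.values (match_and_group L k PySem.Dict.empty)).flatMap
        (fun group => group.map (fun layer_id => layer_id))).foldl (pvMagStep k) b0).items =
    ((PySem.List.dedup (b0.keys ++ L.map (fun h => PySem.Str.slice h none (some k)))).foldl
      (fun res key => res.insert key (pvGroupOf L k b0 key)) PySem.Dict.empty).items := by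
  rw [pvA_onepass L k b0 hnd]
  -- the key list B iterates over = keys of the one-pass fold
  have horder : PySem.List.dedup (b0.keys ++ L.map (fun h => PySem.Str.slice h none (some k)))
      = PySem.Set.update b0.keys (L.map (pvPfx k)) := by
    rw [PySem.List.dedup_eq_ofList, PySem.Set.ofList_append,
        PySem.Set.ofList_eq_self_of_nodup b0.keys hnd]
    rfl
  have hndO : (PySem.Set.update b0.keys (L.map (pvPfx k))).Nodup :=
    PySem.Set.nodup_update _ _ hnd
  -- B's result dict: fresh distinct keys inserted into an empty dict
  have hB : ((PySem.Set.update b0.keys (L.map (pvPfx k))).foldl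
      (fun res key => res.insert key (pvGroupOf L k b0 key)) PySem.Dict.empty).items
      = (PySem.Set.update b0.keys (L.map (pvPfx k))).map
          (fun key => (key, pvGroupOf L k b0 key)) := by
    have := PySem.Dict.items_foldl_insert_fresh
      (d := (PySem.Dict.empty : PySem.Dict String (List String)))
      (l := PySem.Set.update b0.keys (L.map (pvPfx k)))
      (k := fun key => key) (v := fun key => pvGroupOf L k b0 key)
      (by intro a _; rfl) (by simpa using hndO)
    simpa using this
  rw [horder, hB]
  -- A's one-pass result items
  have hndA : ((L.foldl (pvMagStep k) b0)).keys.Nodup := by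
    rw [pvFold_keys]; exact PySem.Set.nodup_update _ _ hnd
  rw [PySem.Dict.items_eq_map_keys _ hndA [], pvFold_keys]
  apply List.map_congr_left
  intro c _
  rw [pvFold_getD, pvGroup_eq_update]

-- ===== VERDICT (by name: the statement is the Claim_ definition above) =====
theorem common_layer_identification_spec : Claim_equal_common_layer_identification := by
  intro L k bucket _ hpre
  unfold Spec_common_layer_identification
  unfold common_layer_identification common_layer_identification_alt
  cases bucket with
  | none =>
      exact common_layer_identification_spec_aux L k PySem.Dict.empty (by simp)
  | some b =>
      exact common_layer_identification_spec_aux L k (PySem.Dict.mk b) (by simpa using hpre)
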